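-- pv_equiv track=rewrite | github.com/bopopescu/lazero | multilingual/rockstar/newdawn/info_gather-v0/wizard/holidays/discoveryChannel.py | skimmer
-- ===== SOURCE A (Python) =====
-- def skimmer(a,b):
--     signal=False
--     c=[]
--     for diss in range(len(a)):
--         if a[diss]==b:
--             if signal==False:
--                 c.append([diss,diss+1])
--                 signal=True
--             else:
--                 c[-1][1]=diss+1
--         else:
--             signal=False
--     return c
-- ===== SOURCE B (Python) =====
-- def skimmer(a, b):
--     # Run-consuming two-pointer scan: on a match, advance j to the end of the
--     # whole maximal run and append the finished interval at once.
--     c = []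
--     n = len(a)
--     i = 0
--     while i < n:
--         if a[i] == b:
--             j = i + 1
--             while j < n and a[j] == b:
--                 j += 1
--             c.append([i, j])
--             i = j
--         else:
--             i += 1
--     return c
-- ===== Notes on version B (the rewrite author's own statement) =====
-- stated objective: alternative
-- what changed: Replaces A's flag-based element-at-a-time scan that repeatedly mutates the open interval's end (c[-1][1]=i+1) with a two-pointer scan that consumes each maximal run of matches in one inner loop and appends the finished interval once.
import Mathlib
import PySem

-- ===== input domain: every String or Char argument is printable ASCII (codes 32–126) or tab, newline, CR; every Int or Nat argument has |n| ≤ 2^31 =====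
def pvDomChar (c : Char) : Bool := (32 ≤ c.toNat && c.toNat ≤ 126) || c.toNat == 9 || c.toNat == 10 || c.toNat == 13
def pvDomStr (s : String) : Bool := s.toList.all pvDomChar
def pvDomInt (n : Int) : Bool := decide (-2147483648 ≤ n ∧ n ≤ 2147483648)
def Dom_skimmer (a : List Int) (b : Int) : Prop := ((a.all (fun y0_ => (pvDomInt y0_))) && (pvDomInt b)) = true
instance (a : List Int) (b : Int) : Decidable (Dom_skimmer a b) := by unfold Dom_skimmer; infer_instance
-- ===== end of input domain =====

-- B changes the scan strategy (run-consuming two-pointer loop instead of A's signal flag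
-- with last-interval mutation); same O(n) cost, equivalence proved for the return value.

-- ===== PORT A =====
-- c[-1][1] = v : set index 1 of the last list (A only reaches this with c nonempty
-- and its lists of length 2, so List.set at index 1 is exact there)
def pySetLast : List (List Int) → Int → List (List Int)
  | [], _ => []
  | [l], v => [l.set 1 v]
  | l :: ls, v => l :: pySetLast ls v

-- the body of A's for-loop; diss always in range, so pyGetD is exact
def skimmerStep (a : List Int) (b : Int) (st : Bool × List (List Int)) (diss : Int) :
    Bool × List (List Int) :=
  if PySem.List.pyGetD a diss 0 = b then
    if st.1 = false then (true, st.2 ++ [[diss, diss + 1]])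
    else (st.1, pySetLast st.2 (diss + 1))
  else (false, st.2)

def skimmer (a : List Int) (b : Int) : List (List Int) :=
  ((PySem.List.pyRange 0 (a.length : Int) 1).foldl (skimmerStep a b) (false, [])).2

-- ===== PORT B =====
-- inner while: j advances to the end of the maximal run of b's starting at j
def runEnd (a : List Int) (b : Int) (j : Nat) : Nat :=
  if h : j < a.length then
    if a[j] = b then runEnd a b (j + 1) else j
  else j
termination_by a.length - j

theorem runEnd_ge (a : List Int) (b : Int) (j : Nat) : j ≤ runEnd a b j := by
  unfold runEnd
  split
  · split
    · exact le_trans (Nat.le_succ j) (runEnd_ge a b (j + 1))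
    · exact le_refl j
  · exact le_refl j
termination_by a.length - j

-- outer while over i, accumulating c
def skimmerAltAux (a : List Int) (b : Int) (i : Nat) (c : List (List Int)) :
    List (List Int) :=
  if h : i < a.length then
    if a[i] = b then
      let j := runEnd a b (i + 1)
      skimmerAltAux a b j (c ++ [[(i : Int), (j : Int)]])
    else skimmerAltAux a b (i + 1) c
  else c
termination_by a.length - i
decreasing_by
  · have := runEnd_ge a b (i + 1); omega
  · omega

def skimmer_alt (a : List Int) (b : Int) : List (List Int) :=
  skimmerAltAux a b 0 []

-- ===== PRECONDITION & SPEC =====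
def Spec_skimmer (a : List Int) (b : Int) (out : List (List Int)) : Prop := out = skimmer_alt a b
instance (a : List Int) (b : Int) (out : List (List Int)) : Decidable (Spec_skimmer a b out) := by unfold Spec_skimmer; infer_instance

-- ===== CLAIM (what is proved, stated in full; the proofs are below) =====
def Claim_equal_skimmer : Prop := ∀ (a : List Int) (b : Int), Dom_skimmer a b → Spec_skimmer a b (skimmer a b)

-- ===== LEMMAS AND PROOFS =====

-- structural version of A's fold (index carried as Int)
def AloopP (b : Int) : List Int → Int → Bool × List (List Int) → Bool × List (List Int)
  | [], _, st => st
  | x :: xs, i, st =>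
    AloopP b xs (i + 1)
      (if x = b then
        if st.1 = false then (true, st.2 ++ [[i, i + 1]])
        else (st.1, pySetLast st.2 (i + 1))
      else (false, st.2))

theorem AloopP_cons (b x : Int) (xs : List Int) (i : Int) (st : Bool × List (List Int)) :
    AloopP b (x :: xs) i st
      = AloopP b xs (i + 1)
          (if x = b then
            if st.1 = false then (true, st.2 ++ [[i, i + 1]])
            else (st.1, pySetLast st.2 (i + 1))
          else (false, st.2)) := rfl

-- length of the leading run of b's
def countRun (b : Int) (xs : List Int) : Nat := (xs.takeWhile (fun x => x == b)).length

-- structural version of B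
def Bloop (b : Int) : List Int → Int → List (List Int)
  | [], _ => []
  | x :: xs, i =>
    if x = b then
      [i, i + 1 + (countRun b xs : Int)] :: Bloop b (xs.drop (countRun b xs)) (i + 1 + (countRun b xs : Int))
    else Bloop b xs (i + 1)
termination_by xs => xs.length
decreasing_by
  · simpa using Nat.lt_succ_of_le (List.length_drop_le _ _)
  · simp

theorem pySetLast_append (c : List (List Int)) (p q v : Int) :
    pySetLast (c ++ [[p, q]]) v = c ++ [[p, v]] := by
  induction c with
  | nil => simp [pySetLast, List.set]
  | cons h t ih =>
      cases t with
      | nil => simp [pySetLast, List.set]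
      | cons h' t' => simpa [pySetLast] using ih

-- bridge A: the fold over range(len a) is AloopP
theorem foldA (b : Int) (xs : List Int) : ∀ (pre : List Int) (st : Bool × List (List Int)),
    (PySem.List.pyRange (pre.length : Int) ((pre ++ xs).length : Int) 1).foldl
      (skimmerStep (pre ++ xs) b) st = AloopP b xs (pre.length : Int) st := by
  induction xs with
  | nil =>
      intro pre st
      simp [AloopP]
  | cons x xs ih =>
      intro pre st
      have hlt : (pre.length : Int) < ((pre ++ x :: xs).length : Int) := by
        simp
      rw [PySem.List.pyRange_one_cons hlt, List.foldl_cons]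
      have hget : PySem.List.pyGetD (pre ++ x :: xs) (pre.length : Int) 0 = x := by
        rw [PySem.List.pyGetD_natCast]
        simp [List.getD]
      have hstep : skimmerStep (pre ++ x :: xs) b st (pre.length : Int)
          = (if x = b then
              if st.1 = false then (true, st.2 ++ [[(pre.length : Int), (pre.length : Int) + 1]])
              else (st.1, pySetLast st.2 ((pre.length : Int) + 1))
            else (false, st.2)) := by
        simp [skimmerStep, hget]
      have hre : pre ++ x :: xs = (pre ++ [x]) ++ xs := by simp
      have hlen : ((pre ++ [x]).length : Int) = (pre.length : Int) + 1 := by simp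
      rw [hstep, AloopP]
      have := ih (pre ++ [x])
        (if x = b then
          if st.1 = false then (true, st.2 ++ [[(pre.length : Int), (pre.length : Int) + 1]])
          else (st.1, pySetLast st.2 ((pre.length : Int) + 1))
        else (false, st.2))
      rw [hlen] at this
      rw [← this, hre]

theorem skimmer_eq_AloopP (a : List Int) (b : Int) :
    skimmer a b = (AloopP b a 0 (false, [])).2 := by
  have := foldA b a [] (false, [])
  simp at this
  simp [skimmer, this]

-- the inner while computes the end of the run
theorem runEnd_eq (a : List Int) (b : Int) (j : Nat) (hj : j ≤ a.length) :
    runEnd a b j = j + countRun b (a.drop j) := by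
  unfold runEnd
  split
  · rename_i h
    have hdrop : a.drop j = a[j] :: a.drop (j + 1) := (List.drop_eq_getElem_cons h)
    split
    · rename_i hx
      rw [runEnd_eq a b (j + 1) (by omega)]
      rw [hdrop]
      simp only [countRun, List.takeWhile_cons]
      simp [hx]
      omega
    · rename_i hx
      rw [hdrop]
      simp only [countRun, List.takeWhile_cons]
      simp [hx]
  · rename_i h
    have : a.drop j = [] := by
      apply List.drop_eq_nil_of_le; omega
    simp [countRun, this]
termination_by a.length - j

-- bridge B: the outer while is Bloop on the remaining suffix
theorem aux_eq_Bloop (a : List Int) (b : Int) (i : Nat) (hi : i ≤ a.length) (c : List (List Int)) :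
    skimmerAltAux a b i c = c ++ Bloop b (a.drop i) (i : Int) := by
  unfold skimmerAltAux
  split
  · rename_i h
    have hdrop : a.drop i = a[i] :: a.drop (i + 1) := List.drop_eq_getElem_cons h
    split
    · rename_i hx
      have hk : countRun b (a.drop (i + 1)) ≤ a.length - (i + 1) := by
        have h1 : (List.takeWhile (fun x => x == b) (a.drop (i + 1))).length
            ≤ (a.drop (i + 1)).length := (List.takeWhile_prefix _).length_le
        simpa [countRun] using h1
      have hj : runEnd a b (i + 1) = i + 1 + countRun b (a.drop (i + 1)) :=
        runEnd_eq a b (i + 1) (by omega)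
      rw [aux_eq_Bloop a b (runEnd a b (i + 1)) (by omega) (c ++ [[(i : Int), (runEnd a b (i + 1) : Int)]])]
      rw [hdrop, hj]
      simp only [Bloop, hx, if_pos, List.drop_drop]
      push_cast
      simp
    · rename_i hx
      rw [aux_eq_Bloop a b (i + 1) (by omega) c]
      rw [hdrop]
      simp only [Bloop, hx, ite_false]
      push_cast
      ring_nf
  · rename_i h
    have hnil : a.drop i = [] := List.drop_eq_nil_of_le (by omega)
    simp [hnil, Bloop]
termination_by a.length - i
decreasing_by
  all_goals (have := runEnd_ge a b (i + 1); omega)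

theorem AloopP_eq_Bloop (b : Int) (xs : List Int) :
    (∀ (i : Int) (c : List (List Int)),
        (AloopP b xs i (false, c)).2 = c ++ Bloop b xs i) ∧
    (∀ (i : Int) (c : List (List Int)) (p : Int),
        (AloopP b xs i (true, c ++ [[p, i]])).2
          = (c ++ [[p, i + (countRun b xs : Int)]]) ++ Bloop b (xs.drop (countRun b xs)) (i + (countRun b xs : Int))) := by
  induction xs with
  | nil =>
      constructor
      · intro i c; simp [AloopP, Bloop]
      · intro i c p; simp [AloopP, Bloop, countRun]
  | cons x xs ih =>
      obtain ⟨ih1, ih2⟩ := ih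
      constructor
      · intro i c
        by_cases hx : x = b
        · rw [show AloopP b (x :: xs) i (false, c)
                = AloopP b xs (i + 1) (true, c ++ [[i, i + 1]]) by
              rw [AloopP_cons]; simp [hx]]
          rw [ih2 (i + 1) c i]
          simp [Bloop, hx, List.append_assoc, add_assoc]
        · rw [show AloopP b (x :: xs) i (false, c)
                = AloopP b xs (i + 1) (false, c) by
              rw [AloopP_cons]; simp [hx]]
          rw [ih1 (i + 1) c]
          simp [Bloop, hx]
      · intro i c p
        by_cases hx : x = b
        · rw [show AloopP b (x :: xs) i (true, c ++ [[p, i]])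
                = AloopP b xs (i + 1) (true, c ++ [[p, i + 1]]) by
              rw [AloopP_cons]; simp [hx, pySetLast_append c p i (i + 1)]]
          rw [ih2 (i + 1) c p]
          have hcr : countRun b (x :: xs) = countRun b xs + 1 := by
            simp [countRun, hx]
          rw [hcr, List.drop_succ_cons]
          have e : (i : Int) + ((countRun b xs : Int) + 1) = i + 1 + (countRun b xs : Int) := by ring
          push_cast
          rw [e]
        · rw [show AloopP b (x :: xs) i (true, c ++ [[p, i]])
                = AloopP b xs (i + 1) (false, c ++ [[p, i]]) by
              rw [AloopP_cons]; simp [hx]]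
          rw [ih1 (i + 1) (c ++ [[p, i]])]
          have hcr : countRun b (x :: xs) = 0 := by
            simp [countRun, hx]
          rw [hcr]
          simp [Bloop, hx]

-- ===== VERDICT (by name: the statement is the Claim_ definition above) =====
theorem skimmer_spec : Claim_equal_skimmer := by
  intro a b _
  unfold Spec_skimmer
  rw [skimmer_eq_AloopP, (AloopP_eq_Bloop b a).1 0 []]
  rw [skimmer_alt, aux_eq_Bloop a b 0 (Nat.zero_le _) []]
  simp
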